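-- pv_equiv track=rewrite | github.com/expertflow/Roo-Code-Vibe-Coding | projects/internal-erp/directus/bank-import/parsers/ubs_ebanking_csv.py | first_anchor_date
-- ===== SOURCE A (Python) =====
-- def first_anchor_date(rows: list[dict[str, str]]) -> str:
--     for r in rows:
--         d = r.get("Trade date", "").strip()
--         if d:
--             return d[:10] if len(d) >= 10 else d
--     for r in rows:
--         d = r.get("Booking date", "").strip()
--         if d:
--             return d[:10] if len(d) >= 10 else d
--     return ""
-- ===== SOURCE B (Python) =====
-- def first_anchor_date(rows: list[dict[str, str]]) -> str:
--     booking = None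
--     for r in rows:
--         t = r.get("Trade date", "").strip()
--         if t:
--             return t[:10]
--         if booking is None:
--             b = r.get("Booking date", "").strip()
--             if b:
--                 booking = b
--     return booking[:10] if booking is not None else ""
-- ===== Notes on version B (the rewrite author's own statement) =====
-- stated objective: alternative
-- what changed: A makes two sequential passes over the rows (trade dates, then booking dates); B makes a single pass that returns on the first trade date and carries the first non-empty booking date as a remembered candidate, and drops A's redundant length test before the 10-char truncation.
import Mathlib
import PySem

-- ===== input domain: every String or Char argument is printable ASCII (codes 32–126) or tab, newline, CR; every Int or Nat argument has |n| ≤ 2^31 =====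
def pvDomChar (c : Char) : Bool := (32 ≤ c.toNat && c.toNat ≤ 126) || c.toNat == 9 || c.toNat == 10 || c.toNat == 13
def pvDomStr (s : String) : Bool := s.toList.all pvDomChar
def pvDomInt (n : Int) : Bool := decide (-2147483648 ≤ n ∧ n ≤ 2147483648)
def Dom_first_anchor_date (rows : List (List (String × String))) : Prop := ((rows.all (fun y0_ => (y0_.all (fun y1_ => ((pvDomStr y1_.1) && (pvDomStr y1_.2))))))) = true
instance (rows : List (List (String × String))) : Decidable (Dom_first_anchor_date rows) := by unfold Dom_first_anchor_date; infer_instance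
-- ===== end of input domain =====

-- B replaces A's two sequential passes by one pass that returns on the first trade date
-- and carries the first non-empty booking date as a remembered candidate (objective: alternative).

-- ===== PORT A =====
-- r.get(k, "") on the dict-as-association-list: first matching key, else "".
def fadGet (r : List (String × String)) (k : String) : String :=
  (((r.find? (fun p => p.1 == k)).map Prod.snd).getD "")

-- first loop of A: first non-empty stripped "Trade date", already truncated
def fadLoop (key : String) : List (List (String × String)) → Option String
  | [] => none
  | r :: rest =>
    let d := PySem.Str.strip (fadGet r key)
    if d.toList ≠ [] then
      some (if 10 ≤ PySem.Str.len d then PySem.Str.slice d none (some 10) else d)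
    else fadLoop key rest

def first_anchor_date (rows : List (List (String × String))) : String :=
  match fadLoop "Trade date" rows with
  | some v => v
  | none =>
    match fadLoop "Booking date" rows with
    | some v => v
    | none => ""

-- ===== PORT B =====
-- single pass carrying the first non-empty booking date seen so far
def fadAltLoop : List (List (String × String)) → Option String → String
  | [], booking =>
    match booking with
    | some b => PySem.Str.slice b none (some 10)
    | none => ""
  | r :: rest, booking =>
    let t := PySem.Str.strip (fadGet r "Trade date")
    if t.toList ≠ [] then PySem.Str.slice t none (some 10)
    else
      let booking' :=
        if booking.isNone then
          let b := PySem.Str.strip (fadGet r "Booking date")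
          if b.toList ≠ [] then some b else none
        else booking
      fadAltLoop rest booking'

def first_anchor_date_alt (rows : List (List (String × String))) : String :=
  fadAltLoop rows none

-- ===== PRECONDITION & SPEC =====
def Spec_first_anchor_date (rows : List (List (String × String))) (out : String) : Prop := out = first_anchor_date_alt rows
instance (rows : List (List (String × String))) (out : String) : Decidable (Spec_first_anchor_date rows out) := by unfold Spec_first_anchor_date; infer_instance

-- ===== CLAIM (what is proved, stated in full; the proofs are below) =====
def Claim_equal_first_anchor_date : Prop := ∀ (rows : List (List (String × String))), Dom_first_anchor_date rows → Spec_first_anchor_date rows (first_anchor_date rows)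

-- ===== LEMMAS AND PROOFS =====

-- the length test in A is redundant: s[:10] = s when len(s) < 10
theorem slice10_eq (s : String) :
    (if 10 ≤ PySem.Str.len s then PySem.Str.slice s none (some 10) else s) =
      PySem.Str.slice s none (some 10) := by
  split_ifs with h
  · rfl
  · apply String.toList_inj.mp
    simp only [PySem.Str.len_eq] at h
    simp [PySem.List.slice_to]
    simp at h
    omega

-- slice10_eq in the normal form simp produces inside the loops
theorem slice10_strip (x : String) :
    (if 10 ≤ (PySem.Chars.strip x.toList).length then
        PySem.Str.slice (PySem.Str.strip x) none (some 10)
      else PySem.Str.strip x) =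
      PySem.Str.slice (PySem.Str.strip x) none (some 10) := by
  have h := slice10_eq (PySem.Str.strip x)
  simpa using h

theorem fadAltLoop_eq (rows : List (List (String × String))) (booking : Option String) :
    fadAltLoop rows booking =
      match fadLoop "Trade date" rows with
      | some v => v
      | none =>
        match booking with
        | some b => PySem.Str.slice b none (some 10)
        | none =>
          match fadLoop "Booking date" rows with
          | some v => v
          | none => "" := by
  induction rows generalizing booking with
  | nil => cases booking <;> simp [fadAltLoop, fadLoop]
  | cons r rest ih =>
    by_cases ht : PySem.Chars.strip ((Option.map Prod.snd (r.find? (fun p => p.1 == "Trade date"))).getD "").toList = []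
    · by_cases hb : PySem.Chars.strip ((Option.map Prod.snd (r.find? (fun p => p.1 == "Booking date"))).getD "").toList = []
      · cases booking <;> simp [fadAltLoop, fadLoop, fadGet, ht, hb, ih]
      · cases booking <;>
          simp [fadAltLoop, fadLoop, fadGet, ht, hb, ih, slice10_strip]
    · simp [fadAltLoop, fadLoop, fadGet, ht, slice10_strip]

-- ===== VERDICT (by name: the statement is the Claim_ definition above) =====
theorem first_anchor_date_spec : Claim_equal_first_anchor_date := by
  intro rows _
  unfold Spec_first_anchor_date first_anchor_date first_anchor_date_alt
  rw [fadAltLoop_eq]
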